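-- pv_equiv track=rewrite | github.com/Aryudesu/ABC | ABC/300_399/381/B.py | calc
-- ===== SOURCE A (Python) =====
-- def calc(S):
--     memo = set()
--     if len(S) % 2:
--         return False
--
--     for i in range(len(S) // 2):
--         if S[2 * i] != S[2 * i + 1]:
--             return False
--         if S[2 * i] in memo:
--             return False
--         memo.add(S[2 * i])
--     return True
-- ===== SOURCE B (Python) =====
-- def calc(S):
--     if len(S) % 2:
--         return False
--     E = S[::2]
--     if E != S[1::2]:
--         return False
--     return len(set(E)) == len(E)
-- ===== Notes on version B (the rewrite author's own statement) =====
-- stated objective: simpler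
-- what changed: Replaces A's single fused index loop (early returns, incrementally maintained seen-set) by two bulk passes: compare the even-index slice S[::2] with the odd-index slice S[1::2], then check for repeated pairs via len(set(E)) == len(E).
import Mathlib
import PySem

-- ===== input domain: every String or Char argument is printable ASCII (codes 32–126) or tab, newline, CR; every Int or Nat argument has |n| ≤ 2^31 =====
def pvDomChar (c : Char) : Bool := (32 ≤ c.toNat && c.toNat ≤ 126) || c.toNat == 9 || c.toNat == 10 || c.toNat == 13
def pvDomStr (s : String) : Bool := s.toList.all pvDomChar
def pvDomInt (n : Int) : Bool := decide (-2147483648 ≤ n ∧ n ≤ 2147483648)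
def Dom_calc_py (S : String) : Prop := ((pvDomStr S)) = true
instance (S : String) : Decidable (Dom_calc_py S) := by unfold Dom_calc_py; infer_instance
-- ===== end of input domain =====

-- B replaces A's fused index loop (early returns + an incrementally maintained seen-set) by two
-- bulk passes — slice comparison S[::2] == S[1::2], then len(set(E)) == len(E) — for simplicity.

-- ===== PORT A =====
-- the 'for i in range(len(S)//2)' loop with its early returns and the growing 'memo' set
def calcLoopA (cs : List Char) (k : Nat) (memo : PySem.Set Char) (i : Nat) : Bool :=
  if _h : i < k then
    match PySem.List.pyGet? cs (2 * (i : Int)), PySem.List.pyGet? cs (2 * (i : Int) + 1) with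
    | some a, some b =>
      if a ≠ b then false
      else if PySem.Set.contains memo a then false
      else calcLoopA cs k (PySem.Set.add memo a) (i + 1)
    | _, _ => false   -- unreachable: the loop only indexes in range
  else true
termination_by k - i

def calc_py (S : String) : Bool :=
  let memo : PySem.Set Char := PySem.Set.empty
  if PySem.Int.mod (PySem.Str.len S) 2 ≠ 0 then false
  else calcLoopA S.toList (PySem.Int.floordiv (PySem.Str.len S) 2).toNat memo 0

-- ===== PORT B =====
def calc_py_alt (S : String) : Bool :=
  if PySem.Int.mod (PySem.Str.len S) 2 ≠ 0 then false
  else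
    match PySem.Str.slice? S none none 2, PySem.Str.slice? S (some 1) none 2 with
    | some E, some O =>
        if E != O then false
        else PySem.Set.len (PySem.Set.ofList E.toList) == PySem.Str.len E
    | _, _ => false   -- unreachable: step 2 ≠ 0, so both slices exist

-- ===== PRECONDITION & SPEC =====
def Spec_calc_py (S : String) (out : Bool) : Prop := out = calc_py_alt S
instance (S : String) (out : Bool) : Decidable (Spec_calc_py S out) := by unfold Spec_calc_py; infer_instance

-- ===== CLAIM (what is proved, stated in full; the proofs are below) =====
def Claim_equal_calc_py : Prop := ∀ (S : String), Dom_calc_py S → Spec_calc_py S (calc_py S)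

-- ===== LEMMAS AND PROOFS =====

-- the even-index and odd-index sublists
def evens : List Char → List Char
  | [] => []
  | [a] => [a]
  | a :: _ :: r => a :: evens r

def odds : List Char → List Char
  | [] => []
  | [_] => []
  | _ :: b :: r => b :: odds r

-- A's loop read pairwise off the remaining suffix
def pairCheck : List Char → PySem.Set Char → Bool
  | [], _ => true
  | [_], _ => false
  | a :: b :: r, memo =>
    if a ≠ b then false
    else if PySem.Set.contains memo a then false
    else pairCheck r (PySem.Set.add memo a)

-- "every element is fresh wrt the growing memo"
def freshAll : PySem.Set Char → List Char → Bool
  | _, [] => true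
  | memo, a :: r => !(PySem.Set.contains memo a) && freshAll (PySem.Set.add memo a) r

theorem length_add_le {s : PySem.Set Char} {a : Char} :
    (PySem.Set.add s a).length ≤ s.length + 1 := by
  by_cases h : a ∈ s
  · simp [PySem.Set.add_of_mem h]
  · simp [PySem.Set.add_of_not_mem h]

theorem length_update_le (xs : List Char) : ∀ (s : PySem.Set Char),
    (PySem.Set.update s xs).length ≤ s.length + xs.length := by
  induction xs with
  | nil => intro s; simp [PySem.Set.update_nil]
  | cons a r ih =>
    intro s
    have := ih (PySem.Set.add s a)
    have h2 : (PySem.Set.add s a).length ≤ s.length + 1 := length_add_le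
    simp only [PySem.Set.update_cons, List.length_cons]
    omega

theorem freshAll_len (E : List Char) : ∀ (memo : PySem.Set Char),
    freshAll memo E = ((PySem.Set.update memo E).length == memo.length + E.length) := by
  induction E with
  | nil => intro memo; simp [freshAll, PySem.Set.update_nil]
  | cons a r ih =>
    intro memo
    by_cases hm : a ∈ memo
    · have hlt : (PySem.Set.update memo (a :: r)).length < memo.length + (a :: r).length := by
        have := length_update_le r memo
        simp only [PySem.Set.update_cons, PySem.Set.add_of_mem hm]
        simp only [List.length_cons]; omega
      have : ((PySem.Set.update memo (a :: r)).length == memo.length + (a :: r).length) = false := by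
        simp only [beq_eq_false_iff_ne]; omega
      rw [this]
      simp [freshAll, PySem.Set.contains_eq_listContains, hm]
    · have hadd : PySem.Set.add memo a = memo ++ [a] := PySem.Set.add_of_not_mem hm
      have : freshAll memo (a :: r) = freshAll (memo ++ [a]) r := by
        simp [freshAll, PySem.Set.contains_eq_listContains, hm]
      rw [this, ih (memo ++ [a])]
      have harith : (memo ++ [a]).length + r.length = memo.length + (a :: r).length := by
        simp; omega
      rw [PySem.Set.update_cons, hadd, harith]

theorem pairCheck_eq (l : List Char) : ∀ (memo : PySem.Set Char), l.length % 2 = 0 →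
    pairCheck l memo = ((evens l == odds l) && freshAll memo (evens l)) := by
  induction l using evens.induct with
  | case1 => intro memo _; simp [pairCheck, evens, odds, freshAll]
  | case2 a => intro memo h; simp at h
  | case3 a b r ih =>
    intro memo h
    have hr : r.length % 2 = 0 := by simp only [List.length_cons] at h; omega
    by_cases hab : a = b
    · subst hab
      by_cases hm : a ∈ memo
      · simp [pairCheck, evens, odds, freshAll, hm]
      · have hmem : PySem.Set.contains memo a = false := by
          simpa [PySem.Set.contains_eq_listContains] using hm
        rw [show pairCheck (a :: a :: r) memo = pairCheck r (PySem.Set.add memo a) from by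
          simp [pairCheck, PySem.Set.contains_eq_listContains, hm]]
        rw [ih (PySem.Set.add memo a) hr]
        simp [evens, odds, freshAll, PySem.Set.contains_eq_listContains, hm]
    · simp [pairCheck, evens, odds, hab]

theorem drop_pair {cs : List Char} {i : Nat} {a b : Char} {r : List Char}
    (h : cs.drop (2 * i) = a :: b :: r) :
    cs[2 * i]? = some a ∧ cs[2 * i + 1]? = some b ∧ cs.drop (2 * (i + 1)) = r := by
  have h0 : cs[2 * i]? = (cs.drop (2 * i))[0]? := by simp [List.getElem?_drop]
  have h1 : cs[2 * i + 1]? = (cs.drop (2 * i))[1]? := by simp [List.getElem?_drop]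
  have h2 : cs.drop (2 * (i + 1)) = (cs.drop (2 * i)).drop 2 := by
    have e : 2 * (i + 1) = 2 * i + 2 := by omega
    rw [e, List.drop_drop]
  refine ⟨?_, ?_, ?_⟩
  · rw [h0, h]; rfl
  · rw [h1, h]; rfl
  · rw [h2, h]; rfl

theorem loopA_eq (cs : List Char) (k : Nat) (hlen : cs.length = 2 * k) :
    ∀ (d i : Nat) (memo : PySem.Set Char), d = k - i → i ≤ k →
    calcLoopA cs k memo i = pairCheck (cs.drop (2 * i)) memo := by
  intro d
  induction d with
  | zero =>
    intro i memo hd hik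
    have hik' : i = k := by omega
    subst hik'
    rw [calcLoopA]
    simp [List.drop_eq_nil_of_le (by omega : cs.length ≤ 2 * i), pairCheck]
  | succ d ih =>
    intro i memo hd hik
    have hik' : i < k := by omega
    have hlt : 2 * i + 1 < cs.length := by omega
    obtain ⟨a, b, r, hdrop⟩ : ∃ a b r, cs.drop (2 * i) = a :: b :: r := by
      have h1 : (cs.drop (2 * i)).length = cs.length - 2 * i := by simp
      match hm : cs.drop (2 * i) with
      | [] => rw [hm] at h1; simp at h1; omega
      | [x] => rw [hm] at h1; simp at h1; omega
      | x :: y :: t => exact ⟨x, y, t, rfl⟩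
    obtain ⟨hga, hgb, hdr⟩ := drop_pair hdrop
    rw [calcLoopA, dif_pos hik']
    have e1 : PySem.List.pyGet? cs (2 * (i : Int)) = some a := by
      have : (2 * (i : Int)) = ((2 * i : Nat) : Int) := by push_cast; ring
      rw [this, PySem.List.pyGet?_natCast, hga]
    have e2 : PySem.List.pyGet? cs (2 * (i : Int) + 1) = some b := by
      have : (2 * (i : Int) + 1) = ((2 * i + 1 : Nat) : Int) := by push_cast; ring
      rw [this, PySem.List.pyGet?_natCast, hgb]
    rw [e1, e2]
    simp only [pairCheck, hdrop]
    by_cases hab : a = b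
    case neg => simp [hab]
    case pos =>
      subst hab
      by_cases hm : a ∈ memo
      case pos =>
        simp [hm]
      case neg =>
        have hc : ¬ (PySem.Set.contains memo a = true) := by simpa using hm
        rw [if_neg (show ¬ (a ≠ a) by simp), if_neg (show ¬ (a ≠ a) by simp),
          if_neg hc, if_neg hc]
        rw [ih (i + 1) (PySem.Set.add memo a) (by omega) (by omega), hdr]

theorem filterMap_evens (cs : List Char) :
    (List.range ((cs.length + 1) / 2)).filterMap (fun k => cs[2 * k]?) = evens cs := by
  induction cs using evens.induct with
  | case1 => simp [evens]
  | case2 a => simp [evens]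
  | case3 a b r ih =>
    have hlen : ((a :: b :: r).length + 1) / 2 = (r.length + 1) / 2 + 1 := by
      simp only [List.length_cons]; omega
    rw [hlen, List.range_succ_eq_map, List.filterMap_cons, List.filterMap_map]
    have hfun : ((fun k => (a :: b :: r)[2 * k]?) ∘ Nat.succ) = fun k : Nat => r[2 * k]? := by
      funext k
      simp only [Function.comp]
      have : 2 * k.succ = (2 * k + 1) + 1 := by omega
      rw [this]
      simp
    rw [hfun, ih]
    simp [evens]

theorem filterMap_odds (cs : List Char) :
    (List.range (cs.length / 2)).filterMap (fun k => cs[2 * k + 1]?) = odds cs := by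
  induction cs using odds.induct with
  | case1 => simp [odds]
  | case2 a => simp [odds]
  | case3 a b r ih =>
    have hlen : (a :: b :: r).length / 2 = r.length / 2 + 1 := by
      simp only [List.length_cons]; omega
    rw [hlen, List.range_succ_eq_map, List.filterMap_cons, List.filterMap_map]
    have hfun : ((fun k => (a :: b :: r)[2 * k + 1]?) ∘ Nat.succ) = fun k : Nat => r[2 * k + 1]? := by
      funext k
      simp only [Function.comp]
      have : 2 * k.succ + 1 = (2 * k + 1) + 2 := by omega
      rw [this]
      simp
    rw [hfun, ih]
    simp [odds]

theorem slice?_filterMap_evens (cs : List Char) :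
    PySem.List.slice? cs none none 2 =
      some ((List.range ((cs.length + 1) / 2)).filterMap (fun k => cs[2 * k]?)) := by
  cases cs with
  | nil => decide
  | cons a t =>
    simp only [PySem.List.slice?, PySem.List.sliceIndices]
    norm_num
    have hfun : (fun x : Nat => (a :: t)[(2 * (x:Int)).toNat]?) = (fun k : Nat => (a :: t)[2 * k]?) := by
      funext x
      have h2 : ((2:Int) * (x:Int)).toNat = 2 * x := by omega
      rw [h2]
    have hcnt : (((t.length:Int) + 1 + 2 - 1) / 2).toNat = (t.length + 1 + 1) / 2 := by omega
    rw [hfun, hcnt]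

theorem slice?_filterMap_odds (cs : List Char) :
    PySem.List.slice? cs (some 1) none 2 =
      some ((List.range (cs.length / 2)).filterMap (fun k => cs[2 * k + 1]?)) := by
  cases cs with
  | nil => decide
  | cons a t =>
    simp only [PySem.List.slice?, PySem.List.sliceIndices]
    norm_num
    by_cases ht : 0 < t.length
    · rw [if_pos ht]
      have hcnt : (((t.length:Int) + 2 - 1) / 2).toNat = (t.length + 1) / 2 := by omega
      have hfun : (fun x : Nat => (a :: t)[(1 + 2 * (x:Int)).toNat]?) = (fun x : Nat => t[2 * x]?) := by
        funext x
        have h2 : ((1:Int) + 2 * (x:Int)).toNat = 2 * x + 1 := by omega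
        rw [h2]
        simp
      rw [hfun, hcnt]
    · have h0 : t.length = 0 := by omega
      rw [if_neg ht, h0]
      norm_num

theorem slice_evens (cs : List Char) :
    PySem.List.slice? cs none none 2 = some (evens cs) := by
  rw [slice?_filterMap_evens, filterMap_evens]

theorem slice_odds (cs : List Char) :
    PySem.List.slice? cs (some 1) none 2 = some (odds cs) := by
  rw [slice?_filterMap_odds, filterMap_odds]

theorem natCast_beq (a b : Nat) : (((a : Int)) == ((b : Int))) = (a == b) := by
  by_cases h : a = b <;> simp [h]

-- ===== VERDICT (by name: the statement is the Claim_ definition above) =====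
theorem calc_py_spec : Claim_equal_calc_py := by
  unfold Claim_equal_calc_py
  intro S _
  unfold Spec_calc_py
  simp only [calc_py, calc_py_alt, PySem.Str.len]
  have hmod : PySem.Int.mod ((S.toList.length : Int)) 2 = ((S.toList.length % 2 : Nat) : Int) := by
    rw [PySem.Int.mod_eq_emod_of_pos (by norm_num)]
    push_cast
    rfl
  rw [hmod]
  by_cases hpar : S.toList.length % 2 = 0
  case neg =>
    rw [if_pos (by exact_mod_cast hpar), if_pos (by exact_mod_cast hpar)]
  case pos =>
    rw [if_neg (by rw [hpar]; simp), if_neg (by rw [hpar]; simp)]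
    have hdivA : (PySem.Int.floordiv ((S.toList.length : Int)) 2).toNat = S.toList.length / 2 := by
      rw [PySem.Int.floordiv_eq_ediv_of_pos (by norm_num)]
      omega
    rw [hdivA]
    have hlen : S.toList.length = 2 * (S.toList.length / 2) := by omega
    have hA : calcLoopA S.toList (S.toList.length / 2) PySem.Set.empty 0 =
        pairCheck S.toList PySem.Set.empty := by
      have := loopA_eq S.toList (S.toList.length / 2) hlen (S.toList.length / 2) 0
        PySem.Set.empty (by omega) (by omega)
      simpa using this
    rw [hA]
    have hE : PySem.Str.slice? S none none 2 = some (String.ofList (evens S.toList)) := by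
      simp [PySem.Str.slice?, PySem.Chars.slice?, slice_evens]
    have hO : PySem.Str.slice? S (some 1) none 2 = some (String.ofList (odds S.toList)) := by
      simp [PySem.Str.slice?, PySem.Chars.slice?, slice_odds]
    rw [hE, hO]
    dsimp only
    rw [pairCheck_eq S.toList PySem.Set.empty hpar]
    by_cases hEO : evens S.toList = odds S.toList
    case neg =>
      have hne : String.ofList (evens S.toList) ≠ String.ofList (odds S.toList) := by
        intro he
        exact hEO (by simpa using congrArg String.toList he)
      rw [if_pos (by simp [bne_iff_ne, hne])]
      simp [hEO]
    case pos =>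
      have heq : String.ofList (evens S.toList) = String.ofList (odds S.toList) := by rw [hEO]
      rw [if_neg (by simp [heq])]
      have hfresh := freshAll_len (evens S.toList) PySem.Set.empty
      rw [show (PySem.Set.empty : PySem.Set Char) = [] from rfl] at hfresh ⊢
      rw [PySem.Set.update_nil_left] at hfresh
      simp only [PySem.Set.len]
      have htl : (String.ofList (evens S.toList)).toList = evens S.toList := by simp
      simp only [List.length_nil, Nat.zero_add] at hfresh
      rw [htl, natCast_beq, ← hfresh]
      simp [hEO]
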